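-- pv_equiv track=rewrite | github.com/nktrinhtrinh/omsa | utils.py | grep_output_to_dict
-- ===== SOURCE A (Python) =====
-- def grep_output_to_dict(output):
--     lines = output.split('\n')
--     result = {}
--     for line in lines:
--         if line:
--             key, value = line.split(':', 1)
--             result.setdefault(key.strip(), []).append(value.strip())
--     return result
-- ===== SOURCE B (Python) =====
-- def grep_output_to_dict(output):
--     # table-based two-phase: build stripped (key, value) pairs, dedup keys in
--     # first-occurrence order, then collect each key's values in one comprehension
--     pairs = [(k.strip(), v.strip())
--              for k, v in (line.split(':', 1) for line in output.split('\n') if line)]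
--     keys = list(dict.fromkeys(k for k, _ in pairs))
--     return {k: [v for k2, v in pairs if k2 == k] for k in keys}
-- ===== Notes on version B (the rewrite author's own statement) =====
-- stated objective: alternative
-- what changed: Replaces A's single setdefault-grouping pass over a dict with a three-phase table computation: build a list of stripped (key,value) pairs from the nonempty lines, dedup the keys in first-occurrence order via dict.fromkeys, then collect each key's values with one comprehension scan per key.
import Mathlib
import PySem

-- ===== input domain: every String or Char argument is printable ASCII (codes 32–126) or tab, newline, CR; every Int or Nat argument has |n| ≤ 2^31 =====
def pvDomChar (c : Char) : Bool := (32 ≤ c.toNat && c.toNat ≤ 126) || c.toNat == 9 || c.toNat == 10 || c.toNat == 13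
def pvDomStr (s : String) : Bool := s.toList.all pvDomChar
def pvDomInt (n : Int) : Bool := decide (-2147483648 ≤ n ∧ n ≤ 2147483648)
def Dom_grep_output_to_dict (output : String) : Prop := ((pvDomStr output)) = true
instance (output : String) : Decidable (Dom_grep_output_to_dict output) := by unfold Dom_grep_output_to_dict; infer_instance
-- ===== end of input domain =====

-- B replaces A's single setdefault-grouping pass by a pair table, an ordered key dedup
-- and one value-collecting scan per key (objective: alternative decomposition, not faster).

-- ===== PORT A =====
def grep_output_to_dict (output : String) : List (String × List String) :=
  let lines := (PySem.Str.split? output "\n").getD []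
  (lines.foldl (fun (d : PySem.Dict String (List String)) line =>
      if line ≠ "" then
        let parts := (PySem.Str.splitMax? line ":" 1).getD []
        let key := PySem.Str.strip (parts.getD 0 "")
        let value := PySem.Str.strip (parts.getD 1 "")
        d.modify key [] (fun l => l ++ [value])
      else d)
    PySem.Dict.empty).items

-- ===== PORT B =====
-- stripped (key, value) pair for one nonempty line (shared by the three phases of B)
def pvPairOfLine (line : String) : String × String :=
  let parts := (PySem.Str.splitMax? line ":" 1).getD []
  (PySem.Str.strip (parts.getD 0 ""), PySem.Str.strip (parts.getD 1 ""))

def grep_output_to_dict_alt (output : String) : List (String × List String) :=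
  let pairs := (((PySem.Str.split? output "\n").getD []).filter (fun line => line ≠ "")).map pvPairOfLine
  let keys := PySem.List.dedup (pairs.map (fun p => p.1))
  keys.map (fun k => (k, (pairs.filter (fun p => p.1 == k)).map (fun p => p.2)))

-- ===== PRECONDITION & SPEC =====
-- Pre_ excludes exactly the inputs with a nonempty line containing no ':', on which
-- A's tuple unpacking raises ValueError (B raises there too).
def Pre_grep_output_to_dict (output : String) : Prop :=
  ∀ line ∈ (PySem.Str.split? output "\n").getD [], line ≠ "" → PySem.Str.isIn ":" line = true
instance (output : String) : Decidable (Pre_grep_output_to_dict output) := by unfold Pre_grep_output_to_dict; infer_instance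
def pvWitness_grep_output_to_dict : String := "a: 1\nb:2\n\na:3"

def Spec_grep_output_to_dict (output : String) (out : List (String × List String)) : Prop := out = grep_output_to_dict_alt output
instance (output : String) (out : List (String × List String)) : Decidable (Spec_grep_output_to_dict output out) := by unfold Spec_grep_output_to_dict; infer_instance

-- ===== CLAIM (what is proved, stated in full; the proofs are below) =====
def Claim_equal_grep_output_to_dict : Prop := ∀ (output : String), Dom_grep_output_to_dict output → Pre_grep_output_to_dict output → Spec_grep_output_to_dict output (grep_output_to_dict output)

-- ===== LEMMAS AND PROOFS =====

-- A's grouping loop over the raw lines is the same fold run over B's pair table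
lemma pv_fold_eq (lines : List String) :
    lines.foldl (fun (d : PySem.Dict String (List String)) line =>
        if line ≠ "" then
          let parts := (PySem.Str.splitMax? line ":" 1).getD []
          let key := PySem.Str.strip (parts.getD 0 "")
          let value := PySem.Str.strip (parts.getD 1 "")
          d.modify key [] (fun l => l ++ [value])
        else d)
      PySem.Dict.empty
    = ((lines.filter (fun line => line ≠ "")).map pvPairOfLine).foldl
        (fun (d : PySem.Dict String (List String)) p => d.modify p.1 [] (fun l => l ++ [p.2]))
        PySem.Dict.empty := by
  rw [List.foldl_map, List.foldl_filter]
  simp [pvPairOfLine]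

-- ===== VERDICT (by name: the statement is the Claim_ definition above) =====

theorem grep_output_to_dict_spec : Claim_equal_grep_output_to_dict := by
  intro output _ _
  unfold Spec_grep_output_to_dict grep_output_to_dict grep_output_to_dict_alt
  dsimp only
  rw [pv_fold_eq]
  set pairs := ((((PySem.Str.split? output "\n").getD []).filter (fun line => line ≠ "")).map pvPairOfLine) with hpairs
  have hk := PySem.Dict.keys_foldl_modify_key (κ := String) (ν := List String)
      pairs (fun p => p.1) [] (fun _ p => (fun l => l ++ [p.2])) PySem.Dict.empty
  have hnd := PySem.Dict.nodup_keys_foldl_modify_key (κ := String) (ν := List String)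
      pairs (fun p => p.1) [] (fun _ p => (fun l => l ++ [p.2])) PySem.Dict.empty (by simp [PySem.Dict.empty, PySem.Dict.keys])
  have hitems := PySem.Dict.items_eq_map_keys
      (pairs.foldl (fun (d : PySem.Dict String (List String)) p => d.modify p.1 [] (fun l => l ++ [p.2])) PySem.Dict.empty)
      hnd []
  rw [hitems, hk]
  have hkeys : PySem.Set.update (PySem.Dict.empty (κ := String) (ν := List String)).keys (pairs.map (fun p => p.1))
      = PySem.List.dedup (pairs.map (fun p => p.1)) := rfl
  rw [hkeys]
  apply List.map_congr_left
  intro k _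
  have hg := PySem.Dict.getD_foldl_modify_append pairs (PySem.Dict.empty (κ := String)) k
  simp only [hg]
  simp [PySem.Dict.empty, PySem.Dict.getD, PySem.Dict.get?]
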